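-- pv_equiv track=rewrite | github.com/eedalachaitanya-creator/predictive-analytics | db/fix_categories.py | match_sheet_name
-- ===== SOURCE A (Python) =====
-- def match_sheet_name(wb_sheets, key):
--     """Fixed version — picks shortest match to avoid 'Category Master' hitting 'Sub-Sub-Category Master'."""
--     key_lower = key.lower().strip()
--     exact, endswith, contains = [], [], []
--     for name in wb_sheets:
--         name_lower = name.strip().lower()
--         if name_lower == key_lower:
--             exact.append(name)
--         elif name_lower.endswith(key_lower):
--             endswith.append(name)
--         elif key_lower in name_lower:
--             contains.append(name)
--     for bucket in (exact, endswith, contains):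
--         if bucket:
--             return min(bucket, key=len)
--     return None
-- ===== SOURCE B (Python) =====
-- def match_sheet_name(wb_sheets, key):
--     """Single pass keeping the best (priority, length) match; first-seen wins ties."""
--     key_lower = key.lower().strip()
--     best = None  # (name, rank, length)
--     for name in wb_sheets:
--         name_lower = name.strip().lower()
--         if name_lower == key_lower:
--             rank = 0
--         elif name_lower.endswith(key_lower):
--             rank = 1
--         elif key_lower in name_lower:
--             rank = 2
--         else:
--             continue
--         if best is None or (rank, len(name)) < (best[1], best[2]):
--             best = (name, rank, len(name))
--     return best[0] if best is not None else None
-- ===== Notes on version B (the rewrite author's own statement) =====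
-- stated objective: simpler
-- what changed: Replaced A's three bucket lists plus a second selection loop (min by length per bucket) with a single pass that tracks the best (rank, length) match, updating only on strictly smaller keys so the first-seen name wins ties.
import Mathlib
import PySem

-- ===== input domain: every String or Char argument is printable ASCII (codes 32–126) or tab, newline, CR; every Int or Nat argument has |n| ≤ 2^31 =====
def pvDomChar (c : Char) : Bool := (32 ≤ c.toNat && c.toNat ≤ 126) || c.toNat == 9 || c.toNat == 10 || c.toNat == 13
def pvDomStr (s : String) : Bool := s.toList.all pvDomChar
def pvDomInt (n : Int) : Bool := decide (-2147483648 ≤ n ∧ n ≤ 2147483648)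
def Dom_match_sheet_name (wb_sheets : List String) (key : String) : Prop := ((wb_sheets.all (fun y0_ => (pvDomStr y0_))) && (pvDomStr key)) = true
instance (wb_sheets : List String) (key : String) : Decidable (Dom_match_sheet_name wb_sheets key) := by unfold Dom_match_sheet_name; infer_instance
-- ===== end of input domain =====

-- B replaces A's three buckets + selection loop by a single pass tracking the best (rank, length) match (objective: simpler).

-- ===== PORT A =====
-- one iteration of A's bucket-filling loop (state = (exact, endswith, contains))
def msA_step (key_lower : String) (acc : List String × List String × List String) (name : String) :
    List String × List String × List String :=
  let name_lower := PySem.Str.lower (PySem.Str.strip name)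
  if name_lower = key_lower then (acc.1 ++ [name], acc.2.1, acc.2.2)
  else if PySem.Str.endswith name_lower key_lower then (acc.1, acc.2.1 ++ [name], acc.2.2)
  else if PySem.Str.isIn key_lower name_lower then (acc.1, acc.2.1, acc.2.2 ++ [name])
  else acc

def match_sheet_name (wb_sheets : List String) (key : String) : Option String :=
  let key_lower := PySem.Str.strip (PySem.Str.lower key)
  let buckets := wb_sheets.foldl (msA_step key_lower) ([], [], [])
  -- for bucket in (exact, endswith, contains): if bucket: return min(bucket, key=len)
  if buckets.1 ≠ [] then PySem.List.min? buckets.1 PySem.Str.len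
  else if buckets.2.1 ≠ [] then PySem.List.min? buckets.2.1 PySem.Str.len
  else if buckets.2.2 ≠ [] then PySem.List.min? buckets.2.2 PySem.Str.len
  else none

-- ===== PORT B =====
-- rank of a (normalised) name against the key: 0 exact, 1 endswith, 2 contains, none no match
def msB_rank? (key_lower name_lower : String) : Option Int :=
  if name_lower = key_lower then some 0
  else if PySem.Str.endswith name_lower key_lower then some 1
  else if PySem.Str.isIn key_lower name_lower then some 2
  else none

-- one iteration of B's loop (state = best match so far, as (name, rank, len(name)))
def msB_step (key_lower : String) (best : Option (String × Int × Int)) (name : String) :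
    Option (String × Int × Int) :=
  let name_lower := PySem.Str.lower (PySem.Str.strip name)
  match msB_rank? key_lower name_lower with
  | none => best
  | some r =>
    match best with
    | none => some (name, r, PySem.Str.len name)
    | some b =>
      if r < b.2.1 ∨ (r = b.2.1 ∧ PySem.Str.len name < b.2.2) then some (name, r, PySem.Str.len name)
      else some b

def match_sheet_name_alt (wb_sheets : List String) (key : String) : Option String :=
  let key_lower := PySem.Str.strip (PySem.Str.lower key)
  (wb_sheets.foldl (msB_step key_lower) none).map (·.1)

-- ===== PRECONDITION & SPEC =====
def Spec_match_sheet_name (wb_sheets : List String) (key : String) (out : Option String) : Prop := out = match_sheet_name_alt wb_sheets key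
instance (wb_sheets : List String) (key : String) (out : Option String) : Decidable (Spec_match_sheet_name wb_sheets key out) := by unfold Spec_match_sheet_name; infer_instance

-- ===== CLAIM (what is proved, stated in full; the proofs are below) =====
def Claim_equal_match_sheet_name : Prop := ∀ (wb_sheets : List String) (key : String), Dom_match_sheet_name wb_sheets key → Spec_match_sheet_name wb_sheets key (match_sheet_name wb_sheets key)

-- ===== LEMMAS AND PROOFS =====

-- B's state, computed from A's state: the selected bucket's first length-minimum with its rank
def msSel (st : List String × List String × List String) : Option (String × Int × Int) :=
  match PySem.List.min? st.1 PySem.Str.len with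
  | some m => some (m, 0, PySem.Str.len m)
  | none =>
    match PySem.List.min? st.2.1 PySem.Str.len with
    | some m => some (m, 1, PySem.Str.len m)
    | none =>
      match PySem.List.min? st.2.2 PySem.Str.len with
      | some m => some (m, 2, PySem.Str.len m)
      | none => none

theorem min?_append_singleton {α : Type} (l : List α) (k : α → Int) (x : α) :
    PySem.List.min? (l ++ [x]) k =
      match PySem.List.min? l k with
      | none => some x
      | some m => if k x < k m then some x else some m := by
  simp only [PySem.List.min?, List.foldl_append, List.foldl_cons, List.foldl_nil]
  rfl

theorem foldl_min_isSome {α : Type} (k : α → Int) (l : List α) (m : α) :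
    (l.foldl (fun acc x => match acc with
        | none => some x
        | some m => if k x < k m then some x else some m) (some m)).isSome = true := by
  induction l generalizing m with
  | nil => rfl
  | cons x xs ih =>
    simp only [List.foldl_cons]
    by_cases h : k x < k m <;> simp only [h, if_true, if_false] <;> exact ih _

theorem min?_eq_none_iff {α : Type} (l : List α) (k : α → Int) :
    PySem.List.min? l k = none ↔ l = [] := by
  cases l with
  | nil => simp [PySem.List.min?]
  | cons x xs =>
    simp only [PySem.List.min?, List.foldl_cons]
    constructor
    · intro h
      have hs := foldl_min_isSome k xs x
      exact absurd h (Option.isSome_iff_ne_none.mp hs)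
    · intro h; simp at h

theorem msSel_step (kl : String) (st : List String × List String × List String) (name : String) :
    msB_step kl (msSel st) name = msSel (msA_step kl st name) := by
  obtain ⟨e, s, c⟩ := st
  simp only [msA_step, msB_step, msB_rank?]
  split_ifs with h0 h1 h2
  · -- exact
    simp only [msSel, min?_append_singleton]
    rcases he : PySem.List.min? e PySem.Str.len with _ | m
    · rcases hs : PySem.List.min? s PySem.Str.len with _ | m
      · rcases hc : PySem.List.min? c PySem.Str.len with _ | m <;> simp
      · simp
    · by_cases hlt : name.length < m.length <;> simp [hlt]
  · -- endswith
    simp only [msSel]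
    rcases he : PySem.List.min? e PySem.Str.len with _ | m
    · simp only [min?_append_singleton]
      rcases hs : PySem.List.min? s PySem.Str.len with _ | m
      · rcases hc : PySem.List.min? c PySem.Str.len with _ | m <;> simp
      · by_cases hlt : name.length < m.length <;> simp [hlt]
    · simp
  · -- contains
    simp only [msSel]
    rcases he : PySem.List.min? e PySem.Str.len with _ | m
    · rcases hs : PySem.List.min? s PySem.Str.len with _ | m
      · simp only [min?_append_singleton]
        rcases hc : PySem.List.min? c PySem.Str.len with _ | m
        · simp
        · by_cases hlt : name.length < m.length <;> simp [hlt]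
      · simp
    · simp
  · -- no match
    rfl

theorem msSel_foldl (kl : String) (l : List String) (st : List String × List String × List String) :
    l.foldl (msB_step kl) (msSel st) = msSel (l.foldl (msA_step kl) st) := by
  induction l generalizing st with
  | nil => rfl
  | cons x xs ih => simp only [List.foldl_cons, msSel_step, ih]

-- ===== VERDICT (by name: the statement is the Claim_ definition above) =====
theorem match_sheet_name_spec : Claim_equal_match_sheet_name := by
  intro wb key _
  show match_sheet_name wb key = match_sheet_name_alt wb key
  unfold match_sheet_name match_sheet_name_alt
  dsimp only
  have h := msSel_foldl (PySem.Str.strip (PySem.Str.lower key)) wb ([], [], [])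
  have h0 : msSel (([], [], []) : List String × List String × List String) = none := rfl
  rw [h0] at h
  rw [h]
  set st := wb.foldl (msA_step (PySem.Str.strip (PySem.Str.lower key))) ([], [], []) with hst
  simp only [msSel]
  rcases he : PySem.List.min? st.1 PySem.Str.len with _ | m
  · rcases hs : PySem.List.min? st.2.1 PySem.Str.len with _ | m
    · rcases hc : PySem.List.min? st.2.2 PySem.Str.len with _ | m
      · simp [(min?_eq_none_iff _ _).mp he, (min?_eq_none_iff _ _).mp hs, (min?_eq_none_iff _ _).mp hc]
      · have hcne : st.2.2 ≠ [] := fun h' => by simp [h', PySem.List.min?] at hc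
        simp [(min?_eq_none_iff _ _).mp he, (min?_eq_none_iff _ _).mp hs, hcne]
    · have hsne : st.2.1 ≠ [] := fun h' => by simp [h', PySem.List.min?] at hs
      simp [(min?_eq_none_iff _ _).mp he, hsne]
  · have hene : st.1 ≠ [] := fun h' => by simp [h', PySem.List.min?] at he
    simp [hene]
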